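-- pv_equiv track=rewrite | github.com/deepakrakshit/jarvis | agent/executor.py | _looks_like_failure_text
-- ===== SOURCE A (Python) =====
-- def _looks_like_failure_text(text: str) -> bool:
--     lowered = (text or "").strip().lower()
--     if not lowered:
--         return False
--     markers = (
--         "could not",
--         "unable",
--         "failed",
--         "error",
--         "unavailable",
--         "missing",
--         "timeout",
--         "timed out",
--         "not found",
--         "blocked",
--     )
--     return any(marker in lowered for marker in markers)
-- ===== SOURCE B (Python) =====
-- def _looks_like_failure_text(text: str) -> bool:
--     lowered = (text or "").strip().lower()
--     markers = (
--         "could not",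
--         "unable",
--         "failed",
--         "error",
--         "unavailable",
--         "missing",
--         "timeout",
--         "timed out",
--         "not found",
--         "blocked",
--     )
--     i = 0
--     while i < len(lowered):
--         for marker in markers:
--             if lowered.startswith(marker, i):
--                 return True
--         i += 1
--     return False
-- ===== Notes on version B (the rewrite author's own statement) =====
-- stated objective: alternative
-- what changed: replaces the k independent per-marker substring-containment scans by a single position-major sweep over the lowered text that checks at each index whether any marker starts there (startswith with an offset), returning at the first hit
import Mathlib
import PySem

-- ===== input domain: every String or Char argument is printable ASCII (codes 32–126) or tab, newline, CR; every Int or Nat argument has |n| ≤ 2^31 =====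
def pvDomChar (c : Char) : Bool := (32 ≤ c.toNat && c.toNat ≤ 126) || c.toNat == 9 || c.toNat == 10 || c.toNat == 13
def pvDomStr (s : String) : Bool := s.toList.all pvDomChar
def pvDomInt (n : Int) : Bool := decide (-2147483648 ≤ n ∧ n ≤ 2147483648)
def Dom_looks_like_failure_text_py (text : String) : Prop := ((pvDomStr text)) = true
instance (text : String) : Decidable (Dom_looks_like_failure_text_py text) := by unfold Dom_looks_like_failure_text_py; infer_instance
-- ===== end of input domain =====

-- B replaces the per-marker substring scans by a single position-major sweep
-- checking at each index whether some marker starts there (objective: alternative).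


-- the marker tuple, shared verbatim by both Pythons
def pvMarkers : List (List Char) :=
  ["could not".toList, "unable".toList, "failed".toList, "error".toList,
   "unavailable".toList, "missing".toList, "timeout".toList, "timed out".toList,
   "not found".toList, "blocked".toList]

-- ===== PORT A =====
-- lowered = (text or "").strip().lower(); if not lowered: return False;
-- return any(marker in lowered for marker in markers)
def looks_like_failure_text_py (text : String) : Bool :=
  let lowered := PySem.Chars.lower (PySem.Chars.strip text.toList)
  if lowered = [] then false
  else pvMarkers.any (fun m => PySem.Chars.isIn m lowered)

-- ===== PORT B =====
-- while i < len(lowered): for marker in markers: if lowered.startswith(marker, i): return True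
-- the while loop over i becomes structural recursion over the suffix lowered[i:]
def pvScan : List Char → Bool
  | [] => false
  | c :: rest => (pvMarkers.any fun m => PySem.Chars.startswith (c :: rest) m) || pvScan rest

def looks_like_failure_text_py_alt (text : String) : Bool :=
  pvScan (PySem.Chars.lower (PySem.Chars.strip text.toList))

-- ===== PRECONDITION & SPEC =====
def Spec_looks_like_failure_text_py (text : String) (out : Bool) : Prop := out = looks_like_failure_text_py_alt text
instance (text : String) (out : Bool) : Decidable (Spec_looks_like_failure_text_py text out) := by unfold Spec_looks_like_failure_text_py; infer_instance

-- ===== CLAIM (what is proved, stated in full; the proofs are below) =====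
def Claim_equal_looks_like_failure_text_py : Prop := ∀ (text : String), Dom_looks_like_failure_text_py text → Spec_looks_like_failure_text_py text (looks_like_failure_text_py text)

-- ===== LEMMAS AND PROOFS =====

-- The position-major sweep finds exactly a marker that is a prefix of some suffix.
theorem pvScan_iff (s : List Char) :
    pvScan s = true ↔ ∃ m ∈ pvMarkers, ∃ j, m <+: s.drop j := by
  induction s with
  | nil =>
    simp only [pvScan, List.drop_nil, List.prefix_nil]
    constructor
    · intro h; cases h
    · rintro ⟨m, hm, -, rfl⟩; revert hm; decide
  | cons c rest ih =>
    simp only [pvScan, Bool.or_eq_true, List.any_eq_true, PySem.Chars.startswith_iff, ih]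
    constructor
    · rintro (⟨m, hm, hp⟩ | ⟨m, hm, j, hp⟩)
      · exact ⟨m, hm, 0, hp⟩
      · exact ⟨m, hm, j + 1, hp⟩
    · rintro ⟨m, hm, j, hp⟩
      cases j with
      | zero => exact Or.inl ⟨m, hm, hp⟩
      | succ j => exact Or.inr ⟨m, hm, j, hp⟩

-- The marker-major any(… in …) computes the same boolean as the sweep.
theorem pvAny_isIn_eq_pvScan (s : List Char) :
    (pvMarkers.any fun m => PySem.Chars.isIn m s) = pvScan s := by
  rw [Bool.eq_iff_iff]
  simp only [List.any_eq_true, pvScan_iff]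
  constructor
  · rintro ⟨m, hm, h⟩
    obtain ⟨j, hp⟩ := (PySem.Chars.exists_prefix_drop_iff_isIn m s).mpr h
    exact ⟨m, hm, j, hp⟩
  · rintro ⟨m, hm, j, hp⟩
    exact ⟨m, hm, (PySem.Chars.exists_prefix_drop_iff_isIn m s).mp ⟨j, hp⟩⟩

-- ===== VERDICT (by name: the statement is the Claim_ definition above) =====
theorem looks_like_failure_text_py_spec : Claim_equal_looks_like_failure_text_py := by
  intro text _
  unfold Spec_looks_like_failure_text_py looks_like_failure_text_py looks_like_failure_text_py_alt
  set lowered := PySem.Chars.lower (PySem.Chars.strip text.toList) with hl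
  by_cases h : lowered = []
  · simp [h, pvScan]
  · simp [h, pvAny_isIn_eq_pvScan]
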